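-- pv_equiv track=rewrite | github.com/tzeenchtof/bootcamo_08122018 | funkcje/zadanie_03.py | policz_znaki
-- ===== SOURCE A (Python) =====
-- def policz_znaki(napis, start="<", stop=">"):
--     wynik = 0
--
--     poziom = 0
--
--     for znak in napis:
--         if znak == start:
--             poziom += 1
--         elif znak == stop:
--             poziom -= 1
--         elif poziom:
--             wynik += 1
--     return wynik
-- ===== SOURCE B (Python) =====
-- def policz_znaki(napis, start="<", stop=">"):
--     deltas = [1 if znak == start else (-1 if znak == stop else 0) for znak in napis]
--     levels = []
--     lvl = 0
--     for d in deltas: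
--         lvl += d
--         levels.append(lvl)
--     return sum(1 for d, l in zip(deltas, levels) if d == 0 and l != 0)
-- ===== Notes on version B (the rewrite author's own statement) =====
-- stated objective: alternative
-- what changed: Replaces the single stateful counting loop by a delta/prefix-sum decomposition: map each character to a +1/-1/0 delta, build the running nesting levels, then count the zero-delta positions whose level is nonzero.
import Mathlib
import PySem

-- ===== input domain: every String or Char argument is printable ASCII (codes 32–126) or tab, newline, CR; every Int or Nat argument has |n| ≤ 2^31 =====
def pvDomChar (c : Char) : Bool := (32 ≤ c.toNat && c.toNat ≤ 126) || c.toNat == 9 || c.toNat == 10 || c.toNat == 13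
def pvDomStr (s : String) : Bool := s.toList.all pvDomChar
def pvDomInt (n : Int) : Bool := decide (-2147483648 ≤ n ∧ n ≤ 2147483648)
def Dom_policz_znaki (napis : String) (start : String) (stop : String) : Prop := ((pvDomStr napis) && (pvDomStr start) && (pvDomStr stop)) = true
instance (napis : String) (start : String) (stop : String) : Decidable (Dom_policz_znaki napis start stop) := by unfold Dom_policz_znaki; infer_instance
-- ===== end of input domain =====

-- B replaces A's single stateful loop by a delta / prefix-sum decomposition (same O(n) cost).
-- ===== PORT A =====
def pvAStep (start : String) (stop : String) (st : Int × Int) (znak : Char) : Int × Int :=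
  if String.ofList [znak] == start then (st.1, st.2 + 1)
  else if String.ofList [znak] == stop then (st.1, st.2 - 1)
  else if st.2 ≠ 0 then (st.1 + 1, st.2)
  else st

def policz_znaki (napis : String) (start : String) (stop : String) : Int :=
  (napis.toList.foldl (pvAStep start stop) (0, 0)).1

-- ===== PORT B =====
def pvDelta (start : String) (stop : String) (znak : Char) : Int :=
  if String.ofList [znak] == start then 1 else if String.ofList [znak] == stop then -1 else 0

-- the running-level list built by Source B's accumulation loop
def pvLevels : Int → List Int → List Int
  | _, [] => []
  | lvl, d :: ds => (lvl + d) :: pvLevels (lvl + d) ds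

def policz_znaki_alt (napis : String) (start : String) (stop : String) : Int :=
  let deltas := napis.toList.map (pvDelta start stop)
  let levels := pvLevels 0 deltas
  ((deltas.zip levels).countP (fun p => p.1 == 0 && p.2 != 0) : Int)

-- ===== PRECONDITION & SPEC =====
def Spec_policz_znaki (napis : String) (start : String) (stop : String) (out : Int) : Prop := out = policz_znaki_alt napis start stop
instance (napis : String) (start : String) (stop : String) (out : Int) : Decidable (Spec_policz_znaki napis start stop out) := by unfold Spec_policz_znaki; infer_instance

-- ===== CLAIM (what is proved, stated in full; the proofs are below) =====
def Claim_equal_policz_znaki : Prop := ∀ (napis : String) (start : String) (stop : String), Dom_policz_znaki napis start stop → Spec_policz_znaki napis start stop (policz_znaki napis start stop)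

-- ===== LEMMAS AND PROOFS =====

-- loop invariant: A's fold from (w, p) returns w plus B's count taken with initial level p
theorem pv_key (start stop : String) (l : List Char) : ∀ (w p : Int),
    (l.foldl (pvAStep start stop) (w, p)).1
      = w + (((l.map (pvDelta start stop)).zip (pvLevels p (l.map (pvDelta start stop)))).countP
              (fun q => q.1 == 0 && q.2 != 0) : Int) := by
  induction l with
  | nil => intro w p; simp
  | cons z zs ih =>
    intro w p
    simp only [List.map_cons, pvLevels, List.zip_cons_cons, List.countP_cons, List.foldl_cons]
    by_cases h1 : String.ofList [z] == start
    · simp [pvAStep, pvDelta, h1, ih]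
    · by_cases h2 : String.ofList [z] == stop
      · simp only [pvAStep, pvDelta, h1, h2, if_true, Int.reduceNeg]
        rw [ih]
        norm_num
        rw [show p - 1 = p + -1 by ring]
      · by_cases h3 : p ≠ 0
        · simp [pvAStep, pvDelta, h1, h2, h3, ih]
          ring
        · simp only [ne_eq, not_not] at h3
          subst h3
          simp [pvAStep, pvDelta, h1, h2, ih]

-- ===== VERDICT (by name: the statement is the Claim_ definition above) =====
theorem policz_znaki_spec : Claim_equal_policz_znaki := by
  intro napis start stop _
  unfold Spec_policz_znaki policz_znaki policz_znaki_alt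
  simpa using pv_key start stop napis.toList 0 0
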